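-- pv_equiv track=rewrite | github.com/Carloshenriqueam/legion-chess-bot | swiss_tournament.py | _generate_first_round_pairings
-- ===== SOURCE A (Python) =====
-- from typing import List, Dict, Optional, Tuple
--
-- def _generate_first_round_pairings(participants: List[Dict]) -> List[Tuple[str, Optional[str]]]:
--     """Gera os pairings da primeira rodada (pareamento simples alternado)."""
--     players = [p['player_id'] for p in participants]
--     pairings = []
--
--     for i in range(0, len(players), 2):
--         if i + 1 < len(players):
--             pairings.append((players[i], players[i + 1]))
--         else:
--             pairings.append((players[i], None))
--
--     return pairings
-- ===== SOURCE B (Python) =====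
-- from typing import List, Dict, Optional, Tuple
--
-- def _generate_first_round_pairings(participants: List[Dict]) -> List[Tuple[str, Optional[str]]]:
--     """Gera os pairings da primeira rodada (pareamento simples alternado)."""
--     def pair(ps):
--         if len(ps) >= 2:
--             return [(ps[0], ps[1])] + pair(ps[2:])
--         if ps:
--             return [(ps[0], None)]
--         return []
--     return pair([p['player_id'] for p in participants])
-- ===== Notes on version B (the rewrite author's own statement) =====
-- stated objective: alternative
-- what changed: Replaces the step-2 index loop with explicit i+1 bounds checks by structural recursion that peels the player list two elements at a time, so no indices or length comparisons are needed.
import Mathlib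
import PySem

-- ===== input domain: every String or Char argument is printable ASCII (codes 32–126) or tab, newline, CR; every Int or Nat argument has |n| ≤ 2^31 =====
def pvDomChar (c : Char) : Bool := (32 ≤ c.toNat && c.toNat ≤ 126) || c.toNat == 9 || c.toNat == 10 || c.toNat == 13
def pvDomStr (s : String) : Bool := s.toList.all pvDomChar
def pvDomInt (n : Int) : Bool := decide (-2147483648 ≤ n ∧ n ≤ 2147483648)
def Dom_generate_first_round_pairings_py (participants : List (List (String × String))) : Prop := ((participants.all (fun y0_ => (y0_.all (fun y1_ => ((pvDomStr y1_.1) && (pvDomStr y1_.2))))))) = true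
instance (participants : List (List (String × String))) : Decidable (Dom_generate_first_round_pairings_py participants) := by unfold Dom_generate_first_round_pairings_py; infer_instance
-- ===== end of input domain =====

-- B pairs the extracted player ids by structural recursion, two at a time, instead of A's
-- step-2 index loop; equivalence of return values is proved on all inputs where every
-- participant dict has a 'player_id' key (elsewhere both Pythons raise KeyError).

-- ===== PORT A =====
def generate_first_round_pairings_py (participants : List (List (String × String))) : List (String × Option String) :=
  let players := participants.map (fun p => (p.lookup "player_id").getD "")
  (PySem.List.pyRange 0 (players.length : Int) 2).foldl
    (fun pairings i =>
      if i + 1 < (players.length : Int) then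
        pairings ++ [(PySem.List.pyGetD players i "", some (PySem.List.pyGetD players (i + 1) ""))]
      else
        pairings ++ [(PySem.List.pyGetD players i "", none)]) []

-- ===== PORT B =====
def pairTwoAlt : List String → List (String × Option String)
  | a :: b :: rest => (a, some b) :: pairTwoAlt rest
  | [a] => [(a, none)]
  | [] => []

def generate_first_round_pairings_py_alt (participants : List (List (String × String))) : List (String × Option String) :=
  pairTwoAlt (participants.map (fun p => (p.lookup "player_id").getD ""))

-- ===== PRECONDITION & SPEC =====
-- Pre_ excludes exactly the inputs where some participant lacks the 'player_id' key, on
-- which both A and B raise KeyError.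
def Pre_generate_first_round_pairings_py (participants : List (List (String × String))) : Prop :=
  (participants.all (fun p => (p.lookup "player_id").isSome)) = true
instance (participants : List (List (String × String))) : Decidable (Pre_generate_first_round_pairings_py participants) := by unfold Pre_generate_first_round_pairings_py; infer_instance
def pvWitness_generate_first_round_pairings_py : (List (List (String × String))) :=
  [[("player_id", "alice")], [("player_id", "bob")], [("player_id", "carol")]]

def Spec_generate_first_round_pairings_py (participants : List (List (String × String))) (out : List (String × Option String)) : Prop := out = generate_first_round_pairings_py_alt participants
instance (participants : List (List (String × String))) (out : List (String × Option String)) : Decidable (Spec_generate_first_round_pairings_py participants out) := by unfold Spec_generate_first_round_pairings_py; infer_instance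

-- ===== CLAIM (what is proved, stated in full; the proofs are below) =====
def Claim_equal_generate_first_round_pairings_py : Prop := ∀ (participants : List (List (String × String))), Dom_generate_first_round_pairings_py participants → Pre_generate_first_round_pairings_py participants → Spec_generate_first_round_pairings_py participants (generate_first_round_pairings_py participants)

-- ===== LEMMAS AND PROOFS =====

-- one iteration of A's loop, as the list it appends
def pvStepA (players : List String) (i : Int) : List (String × Option String) :=
  if i + 1 < (players.length : Int) then
    [(PySem.List.pyGetD players i "", some (PySem.List.pyGetD players (i + 1) ""))]
  else
    [(PySem.List.pyGetD players i "", none)]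

theorem pvRange2_shift (n : Nat) :
    PySem.List.pyRange 0 ((n : Int) + 2) 2 =
      0 :: (PySem.List.pyRange 0 (n : Int) 2).map (· + 2) := by
  rw [PySem.List.pyRange_of_pos 0 ((n : Int) + 2) (by norm_num),
      PySem.List.pyRange_of_pos 0 (n : Int) (by norm_num)]
  have h1 : (((n : Int) + 2 - 0 + 2 - 1) / 2).toNat =
      (if (0 : Int) < n then (((n : Int) - 0 + 2 - 1) / 2).toNat else 0) + 1 := by
    split <;> omega
  rw [if_pos (by omega : (0 : Int) < (n : Int) + 2), h1, List.range_succ_eq_map]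
  simp only [List.map_cons, List.map_map]
  refine List.cons_eq_cons.mpr ⟨by norm_num, ?_⟩
  apply List.map_congr_left
  intro k _
  simp only [Function.comp]
  push_cast
  ring

theorem pvStepA_shift (a b : String) (rest : List String) (x : Int) (hx : 0 ≤ x) :
    pvStepA (a :: b :: rest) (x + 2) = pvStepA rest x := by
  have hg : ∀ (y : Int), 0 ≤ y →
      PySem.List.pyGetD (a :: b :: rest) (y + 2) "" = PySem.List.pyGetD rest y "" := by
    intro y hy
    rw [PySem.List.pyGetD_of_nonneg _ _ (by omega), PySem.List.pyGetD_of_nonneg _ _ hy]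
    have : (y + 2).toNat = y.toNat + 2 := by omega
    rw [this]
    rfl
  have hlen2 : (((a :: b :: rest).length : Int)) = (rest.length : Int) + 2 := by
    simp only [List.length_cons]; push_cast; ring
  unfold pvStepA
  by_cases h : x + 1 < (rest.length : Int)
  · rw [if_pos (by rw [hlen2]; omega), if_pos h,
      hg x hx, show x + 2 + 1 = (x + 1) + 2 by ring, hg (x + 1) (by omega)]
  · rw [if_neg (by rw [hlen2]; omega), if_neg h, hg x hx]

theorem pvFlat_eq_pairTwo (players : List String) :
    (PySem.List.pyRange 0 (players.length : Int) 2).flatMap (pvStepA players) =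
      pairTwoAlt players := by
  induction players using pairTwoAlt.induct with
  | case1 a b rest ih =>
    have hlen : (((a :: b :: rest).length : Int)) = (rest.length : Int) + 2 := by
      simp only [List.length_cons]; push_cast; ring
    rw [hlen, pvRange2_shift rest.length, List.flatMap_cons]
    have hstep0 : pvStepA (a :: b :: rest) 0 = [(a, some b)] := by
      unfold pvStepA
      rw [if_pos (by rw [hlen]; omega)]
      simp [PySem.List.pyGetD_of_nonneg]
    rw [hstep0]
    have hmap : (((PySem.List.pyRange 0 (rest.length : Int) 2).map (· + 2)).map
        (pvStepA (a :: b :: rest))).flatten =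
        (PySem.List.pyRange 0 (rest.length : Int) 2).flatMap (pvStepA rest) := by
      rw [List.map_map, ← List.flatMap_def]
      apply congrArg List.flatten
      apply List.map_congr_left
      intro x hx
      have hx0 : 0 ≤ x := by
        rcases (PySem.List.mem_pyRange_iff_of_pos (by norm_num) x).mp hx with ⟨h0, _, _⟩
        exact h0
      exact pvStepA_shift a b rest x hx0
    rw [List.flatMap_def, hmap, ih]
    rfl
  | case2 a =>
    have h0 : PySem.List.pyRange 0 (([a] : List String).length : Int) 2 = [0] := by
      have h1 : (([a] : List String).length : Int) = 1 := by simp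
      rw [h1]; decide
    rw [h0, List.flatMap_cons, List.flatMap_nil]
    simp [pvStepA, pairTwoAlt, PySem.List.pyGetD, PySem.List.pyGet?, PySem.List.pyIdx?]
  | case3 =>
    have h0 : PySem.List.pyRange 0 (([] : List String).length : Int) 2 = [] := by
      have h1 : (([] : List String).length : Int) = 0 := by simp
      rw [h1]; decide
    rw [h0, List.flatMap_nil]
    rfl

-- ===== VERDICT (by name: the statement is the Claim_ definition above) =====
theorem generate_first_round_pairings_py_spec : Claim_equal_generate_first_round_pairings_py := by
  intro participants _ _
  unfold Spec_generate_first_round_pairings_py generate_first_round_pairings_py generate_first_round_pairings_py_alt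
  generalize (participants.map (fun p => (p.lookup "player_id").getD "")) = players
  rw [PySem.List.foldl_congr_mem _ _ (fun acc i => acc ++ pvStepA players i) []
      (by intro acc x _; by_cases h : x + 1 < (players.length : Int) <;> simp [pvStepA, h]),
    PySem.List.foldl_append_eq_flatMap]
  simpa using pvFlat_eq_pairTwo players
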